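-- pv_equiv track=rewrite | github.com/consultant-1379/adp-app-staging | technicals/pythonscripts/drop_status.py | failed_count
-- ===== SOURCE A (Python) =====
-- def failed_count(results, last_version):
--     "Count the failures at the latest executions."
--     count = 0
--     for result in results:
--         if result[1] != 'SUCCEEDED':
--             if result[1] != 'RUNNING':
--                 if result[0] != last_version:
--                     count += 1
--                 else:
--                     return count
--         else:
--             return count
--     return count
-- ===== SOURCE B (Python) =====
-- def failed_count(results, last_version):
--     "Count the failures at the latest executions."
--     def stop(r):
--         return r[1] == 'SUCCEEDED' or (r[1] != 'RUNNING' and r[0] == last_version)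
--     prefix = []
--     for r in results:
--         if stop(r):
--             break
--         prefix.append(r)
--     return sum(1 for r in prefix if r[1] != 'RUNNING')
-- ===== Notes on version B (the rewrite author's own statement) =====
-- stated objective: alternative
-- what changed: Two-pass decomposition: first build the prefix before the terminating record (SUCCEEDED, or non-RUNNING with the last version), then count the non-RUNNING entries in that prefix, instead of one fused loop with an accumulator and early returns.
import Mathlib
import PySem

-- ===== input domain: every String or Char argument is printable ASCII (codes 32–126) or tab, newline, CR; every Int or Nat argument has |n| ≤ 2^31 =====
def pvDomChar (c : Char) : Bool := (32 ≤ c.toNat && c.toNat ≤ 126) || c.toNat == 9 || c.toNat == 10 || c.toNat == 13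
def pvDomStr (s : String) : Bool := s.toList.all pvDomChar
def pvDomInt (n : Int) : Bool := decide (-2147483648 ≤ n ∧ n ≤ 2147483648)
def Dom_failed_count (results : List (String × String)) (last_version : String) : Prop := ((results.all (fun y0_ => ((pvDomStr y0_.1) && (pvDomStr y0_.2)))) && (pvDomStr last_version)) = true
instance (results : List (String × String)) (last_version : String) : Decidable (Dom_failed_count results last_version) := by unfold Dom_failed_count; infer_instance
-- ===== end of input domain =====

-- B replaces A's fused loop-with-early-returns by a two-pass decomposition (take the prefix before the stopping record, then count non-RUNNING entries); alternative structure, same cost.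


-- ===== PORT A =====
-- A's loop with accumulator `count` and early returns, as structural recursion.
def fcGoA (last_version : String) : List (String × String) → Int → Int
  | [], count => count
  | r :: rest, count =>
    if r.2 ≠ "SUCCEEDED" then
      if r.2 ≠ "RUNNING" then
        if r.1 ≠ last_version then fcGoA last_version rest (count + 1)
        else count
      else fcGoA last_version rest count
    else count

def failed_count (results : List (String × String)) (last_version : String) : Int :=
  fcGoA last_version results 0

-- ===== PORT B =====
def fcStop (last_version : String) (r : String × String) : Bool :=
  r.2 == "SUCCEEDED" || (r.2 != "RUNNING" && r.1 == last_version)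

-- Source B's loop building `prefix` until stop(r)
def fcPrefix (last_version : String) : List (String × String) → List (String × String)
  | [] => []
  | r :: rest =>
    if fcStop last_version r then []
    else r :: fcPrefix last_version rest

def failed_count_alt (results : List (String × String)) (last_version : String) : Int :=
  ((fcPrefix last_version results).filter (fun r => r.2 != "RUNNING")).length

-- ===== PRECONDITION & SPEC =====
def Spec_failed_count (results : List (String × String)) (last_version : String) (out : Int) : Prop := out = failed_count_alt results last_version
instance (results : List (String × String)) (last_version : String) (out : Int) : Decidable (Spec_failed_count results last_version out) := by unfold Spec_failed_count; infer_instance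

-- ===== CLAIM (what is proved, stated in full; the proofs are below) =====
def Claim_equal_failed_count : Prop := ∀ (results : List (String × String)) (last_version : String), Dom_failed_count results last_version → Spec_failed_count results last_version (failed_count results last_version)

-- ===== LEMMAS AND PROOFS =====
theorem fcGoA_eq (last_version : String) (results : List (String × String)) (count : Int) :
    fcGoA last_version results count = count + failed_count_alt results last_version := by
  induction results generalizing count with
  | nil => simp [fcGoA, failed_count_alt, fcPrefix]
  | cons r rest ih =>
    by_cases hs : r.2 = "SUCCEEDED"
    · simp [fcGoA, failed_count_alt, fcPrefix, fcStop, hs]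
    · by_cases hr : r.2 = "RUNNING"
      · simp [fcGoA, failed_count_alt, fcPrefix, fcStop, hr, ih]
      · by_cases hv : r.1 = last_version
        · simp [fcGoA, failed_count_alt, fcPrefix, fcStop, hs, hr, hv]
        · simp only [fcGoA, failed_count_alt, fcPrefix, fcStop, hs, hr, hv, ih, if_pos, ne_eq, not_false_iff]
          simp [hs, hr, hv]
          omega

-- ===== VERDICT (by name: the statement is the Claim_ definition above) =====
theorem failed_count_spec : Claim_equal_failed_count := by
  intro results last_version _
  unfold Spec_failed_count failed_count
  rw [fcGoA_eq]
  omega
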